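-- pv_equiv track=rewrite | github.com/monkey0211/AlgoInPython | LinkedIn/Linkedin_Tallest Brick Tower Problem.py | max_tower_height_w
-- ===== SOURCE A (Python) =====
-- def max_tower_height_w(blocks):
--     # 按(承重能力递增,高度递减)排序:先用 承重差且高度高的blocks
--     blocks.sort(key=lambda x: (x[2], -x[3]))
--
--     n = len(blocks)
--     max_weight = max(block[2] for block in blocks)
--
--     # 初始化dp数组
--     dp = [[0] * (max_weight + 1) for _ in range(n + 1)]
--
--     for i in range(1, n + 1):
--         count, weight, support, height = blocks[i - 1]
--         for w in range(max_weight + 1):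
--             dp[i][w] = dp[i-1][w]               # 不使用当前块
--
--             # 尝试使用当前砖块 枚举可能用多少块当前砖
--             for k in range(1, count + 1):
--                 if k * weight <= w and w <= support:
--                     dp[i][w] = max(dp[i][w], dp[i-1][w - k * weight] + k * height)
--
--     return dp[n][max_weight]
-- ===== SOURCE B (Python) =====
-- def max_tower_height_w(blocks):
--     # Bounded-knapsack via binary splitting: each block's count is split into
--     # power-of-two pieces, each piece handled as a 0/1 item over one dp row.
--     # (A sorts its argument in place; B leaves the argument untouched --
--     # the equivalence claimed is about the return value.)
--     bs = sorted(blocks, key=lambda x: (x[2], -x[3]))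
--     W = max(b[2] for b in bs)
--     dp = [0] * (W + 1)
--     for count, weight, support, height in bs:
--         pieces = []
--         c, p = count, 1
--         while c > 0:
--             m = min(p, c)
--             pieces.append(m)
--             c -= m
--             p *= 2
--         for m in pieces:
--             mw, mh = m * weight, m * height
--             dp = [max(dp[w], dp[w - mw] + mh) if (mw <= w and w <= support) else dp[w]
--                   for w in range(W + 1)]
--     return dp[W]
-- ===== Notes on version B (the rewrite author's own statement) =====
-- stated objective: faster
-- what changed: B replaces A's per-cell enumeration of every usable count k (O(count) work per dp cell) by binary splitting of each block's count into power-of-two pieces, each processed as a single 0/1-knapsack pass over one rolling dp row, so the count factor drops to log(count).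
-- outside the precondition, e.g. on max_tower_height_w([]): A raises ValueError, B raises ValueError; on max_tower_height_w([(1, 2, -3, 5)]): A raises IndexError, B raises IndexError; on max_tower_height_w([(2, -3, 5, 1)]): A raises IndexError, B raises IndexError
import Mathlib
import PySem

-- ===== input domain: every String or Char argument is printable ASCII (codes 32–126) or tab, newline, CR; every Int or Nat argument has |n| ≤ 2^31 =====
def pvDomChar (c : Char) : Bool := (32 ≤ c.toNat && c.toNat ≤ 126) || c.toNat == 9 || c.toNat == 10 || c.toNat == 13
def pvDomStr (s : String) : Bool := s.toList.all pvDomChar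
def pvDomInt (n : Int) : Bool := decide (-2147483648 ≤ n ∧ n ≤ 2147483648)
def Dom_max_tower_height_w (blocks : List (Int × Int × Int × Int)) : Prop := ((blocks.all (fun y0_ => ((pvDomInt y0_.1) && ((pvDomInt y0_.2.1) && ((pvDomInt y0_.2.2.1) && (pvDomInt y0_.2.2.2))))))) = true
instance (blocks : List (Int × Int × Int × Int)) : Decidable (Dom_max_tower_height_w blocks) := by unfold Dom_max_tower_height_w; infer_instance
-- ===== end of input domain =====

-- B replaces A's per-block enumeration of every count k by binary splitting of the count
-- into power-of-two 0/1 pieces (objective: faster — O(log count) instead of O(count) passes per block).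
-- A sorts its argument list in place; B does not mutate it — the equivalence is about the return value.

-- ===== PORT A =====
-- one dp row update: dp[i][w] = dp[i-1][w] then max over k = 1..count (A reads only row i-1,
-- and only the last row reaches the answer, so the table is kept row by row)
def rowA (mw : Int) (prev : List Int) (b : Int × Int × Int × Int) : List Int :=
  (PySem.List.pyRange 0 (mw + 1) 1).map (fun w =>
    (PySem.List.pyRange 1 (b.1 + 1) 1).foldl
      (fun cur k =>
        if k * b.2.1 ≤ w ∧ w ≤ b.2.2.1 then
          max cur (PySem.List.pyGetD prev (w - k * b.2.1) 0 + k * b.2.2.2)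
        else cur)
      (PySem.List.pyGetD prev w 0))

-- pyGetD is exact here: inside Pre_ every index A reads is in range (see Pre_ comment)
def max_tower_height_w (blocks : List (Int × Int × Int × Int)) : Int :=
  let bs := PySem.List.sorted2 blocks (fun x => x.2.2.1) (fun x => -x.2.2.2)
  let mw := (PySem.List.max? (bs.map (fun b => b.2.2.1)) (fun x => x)).getD 0
  let dp0 : List Int := List.replicate (mw + 1).toNat 0
  PySem.List.pyGetD (bs.foldl (fun prev b => rowA mw prev b) dp0) mw 0

-- ===== PORT B =====
-- binary split of count: pieces 1,2,4,…,rest; fuel = c.toNat suffices since c shrinks by ≥ 1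
-- per iteration (p starts at 1)
def piecesB : Nat → Int → Int → List Int
  | 0, _, _ => []
  | fuel + 1, c, p => if 0 < c then min p c :: piecesB fuel (c - min p c) (p * 2) else []

-- one 0/1 pass for a piece of m copies (weight m*wt, height m*h), usable only while w ≤ s
def pieceRowB (mw s : Int) (dp : List Int) (mwt mh : Int) : List Int :=
  (PySem.List.pyRange 0 (mw + 1) 1).map (fun w =>
    if mwt ≤ w ∧ w ≤ s then
      max (PySem.List.pyGetD dp w 0) (PySem.List.pyGetD dp (w - mwt) 0 + mh)
    else PySem.List.pyGetD dp w 0)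

def max_tower_height_w_alt (blocks : List (Int × Int × Int × Int)) : Int :=
  let bs := PySem.List.sorted2 blocks (fun x => x.2.2.1) (fun x => -x.2.2.2)
  let mw := (PySem.List.max? (bs.map (fun b => b.2.2.1)) (fun x => x)).getD 0
  let dp0 : List Int := List.replicate (mw + 1).toNat 0
  PySem.List.pyGetD
    (bs.foldl (fun dp b =>
      (piecesB b.1.toNat b.1 1).foldl
        (fun dp m => pieceRowB mw b.2.2.1 dp (m * b.2.1) (m * b.2.2.2)) dp) dp0)
    mw 0

-- ===== PRECONDITION & SPEC =====
-- Pre_ excludes: the empty list and lists whose supports are all negative (A raises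
-- ValueError resp. IndexError), and lists containing a usable (count ≥ 1, support ≥ 0)
-- block of negative weight — physically meaningless input on which A usually raises
-- IndexError and otherwise returns a value produced by reading dp cells beyond the
-- intended weight window, an accident of its table layout.
def Pre_max_tower_height_w (blocks : List (Int × Int × Int × Int)) : Prop :=
  blocks ≠ [] ∧ (∃ b ∈ blocks, 0 ≤ b.2.2.1) ∧
    ∀ b ∈ blocks, 1 ≤ b.1 → 0 ≤ b.2.2.1 → 0 ≤ b.2.1
instance (blocks : List (Int × Int × Int × Int)) : Decidable (Pre_max_tower_height_w blocks) := by
  unfold Pre_max_tower_height_w; infer_instance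

def pvWitness_max_tower_height_w : (List (Int × Int × Int × Int)) := [(2, 1, 3, 5), (1, 2, 4, 3)]

def Spec_max_tower_height_w (blocks : List (Int × Int × Int × Int)) (out : Int) : Prop := out = max_tower_height_w_alt blocks
instance (blocks : List (Int × Int × Int × Int)) (out : Int) : Decidable (Spec_max_tower_height_w blocks out) := by unfold Spec_max_tower_height_w; infer_instance

-- ===== CLAIM (what is proved, stated in full; the proofs are below) =====
def Claim_equal_max_tower_height_w : Prop := ∀ (blocks : List (Int × Int × Int × Int)), Dom_max_tower_height_w blocks → Pre_max_tower_height_w blocks → Spec_max_tower_height_w blocks (max_tower_height_w blocks)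

-- ===== LEMMAS AND PROOFS =====

-- canonical value of one dp cell: best over using k = 0..n copies of the block (wt, s, h)
-- on top of row `prev`, at remaining weight w
def bestK (prev : List Int) (wt s h : Int) : Nat → Int → Int
  | 0, w => PySem.List.pyGetD prev w 0
  | n + 1, w =>
    if ((n : Int) + 1) * wt ≤ w ∧ w ≤ s then
      max (bestK prev wt s h n w)
        (PySem.List.pyGetD prev (w - ((n : Int) + 1) * wt) 0 + ((n : Int) + 1) * h)
    else bestK prev wt s h n w

def rowOf (prev : List Int) (wt s h mw : Int) (σ : Nat) : List Int :=
  (PySem.List.pyRange 0 (mw + 1) 1).map (bestK prev wt s h σ)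

theorem bestK_le_succ (prev : List Int) (wt s h : Int) (n : Nat) (w : Int) :
    bestK prev wt s h n w ≤ bestK prev wt s h (n + 1) w := by
  show _ ≤ (if _ then _ else _)
  split_ifs with h
  · exact le_max_left _ _
  · exact le_rfl

theorem bestK_mono (prev : List Int) (wt s h : Int) {n n' : Nat} (hle : n ≤ n') (w : Int) :
    bestK prev wt s h n w ≤ bestK prev wt s h n' w := by
  induction n', hle using Nat.le_induction with
  | base => exact le_rfl
  | succ k hk ih => exact le_trans ih (bestK_le_succ prev wt s h k w)

theorem pv_le_bestK (prev : List Int) (wt s h : Int) (n : Nat) (w : Int) :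
    PySem.List.pyGetD prev w 0 ≤ bestK prev wt s h n w := by
  induction n with
  | zero => exact le_rfl
  | succ k ih => exact le_trans ih (bestK_le_succ prev wt s h k w)

theorem cand_le_bestK (prev : List Int) (wt s h : Int) {k n : Nat} (hk1 : 1 ≤ k) (hkn : k ≤ n)
    {w : Int} (hkw : (k : Int) * wt ≤ w) (hws : w ≤ s) :
    PySem.List.pyGetD prev (w - (k : Int) * wt) 0 + (k : Int) * h ≤ bestK prev wt s h n w := by
  induction n with
  | zero => omega
  | succ j ih =>
    rcases Nat.lt_or_ge k (j + 1) with hlt | hge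
    · exact le_trans (ih (by omega)) (bestK_le_succ prev wt s h j w)
    · have hkj : k = j + 1 := by omega
      subst hkj
      show _ ≤ (if _ then _ else _)
      rw [if_pos ⟨by push_cast at hkw ⊢; omega, hws⟩]
      refine le_trans (le_of_eq ?_) (le_max_right _ _)
      norm_num

theorem bestK_of_gt_s (prev : List Int) (wt s h : Int) (n : Nat) {w : Int} (hw : s < w) :
    bestK prev wt s h n w = PySem.List.pyGetD prev w 0 := by
  induction n with
  | zero => rfl
  | succ j ih =>
    show (if _ then _ else _) = _
    rw [if_neg (by rintro ⟨-, h2⟩; omega)]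
    exact ih

theorem bestK_stable (prev : List Int) {wt : Int} (s h : Int) {n : Nat} {w : Int}
    (hwt : 0 ≤ wt) (hgt : w < ((n : Int) + 1) * wt) (j : Nat) :
    bestK prev wt s h (n + j) w = bestK prev wt s h n w := by
  induction j with
  | zero => rfl
  | succ i ih =>
    have hstep : ((n + i : Nat) : Int) + 1 ≥ ((n : Int) + 1) := by push_cast; omega
    have : ¬ (((n + i : Nat) : Int) + 1) * wt ≤ w := by
      intro hle
      have : ((n : Int) + 1) * wt ≤ (((n + i : Nat) : Int) + 1) * wt :=
        mul_le_mul_of_nonneg_right hstep hwt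
      omega
    show (if _ then _ else _) = _
    rw [if_neg (by rintro ⟨h1, -⟩; exact this h1)]
    exact ih

theorem shift_le_bestK (prev : List Int) {wt : Int} (s h : Int) {m : Nat} (hm : 1 ≤ m)
    {w : Int} (_hwt : 0 ≤ wt) (hmw : (m : Int) * wt ≤ w) (hws : w ≤ s) (n : Nat) :
    bestK prev wt s h n (w - (m : Int) * wt) + (m : Int) * h ≤ bestK prev wt s h (n + m) w := by
  induction n with
  | zero =>
    have h0 := cand_le_bestK prev wt s h hm le_rfl hmw hws
    simpa [bestK] using h0
  | succ j ih =>
    have hmono : bestK prev wt s h (j + m) w ≤ bestK prev wt s h (j + 1 + m) w := by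
      have hp := bestK_le_succ prev wt s h (j + m) w
      rwa [show j + m + 1 = j + 1 + m from by omega] at hp
    show (if _ then _ else _) + _ ≤ _
    split_ifs with hg
    · rw [← max_add_add_right]
      refine max_le (le_trans ih hmono) ?_
      have hcast : w - (m : Int) * wt - ((j : Int) + 1) * wt = w - ((j + 1 + m : Nat) : Int) * wt := by
        push_cast; ring
      have hval : ((j : Int) + 1) * h + (m : Int) * h = ((j + 1 + m : Nat) : Int) * h := by
        push_cast; ring
      have hw2 : ((j + 1 + m : Nat) : Int) * wt ≤ w := by push_cast; nlinarith [hg.1]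
      have hcand := cand_le_bestK prev wt s h (k := j + 1 + m) (n := j + 1 + m) (by omega) le_rfl (w := w) hw2 hws
      have heq : PySem.List.pyGetD prev (w - (m : Int) * wt - ((j : Int) + 1) * wt) 0 + ((j : Int) + 1) * h + (m : Int) * h
          = PySem.List.pyGetD prev (w - ((j + 1 + m : Nat) : Int) * wt) 0 + ((j + 1 + m : Nat) : Int) * h := by
        rw [hcast, add_assoc, hval]
      rw [heq]
      exact hcand
    · exact le_trans ih hmono

theorem bestK_upper (prev : List Int) {wt : Int} (s h : Int) {m σ : Nat} (_hm : 1 ≤ m)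
    (hmσ : m ≤ σ + 1) {w : Int} (hwt : 0 ≤ wt) (_hmw : (m : Int) * wt ≤ w) (hws : w ≤ s)
    (j : Nat) (hj : j ≤ m) :
    bestK prev wt s h (σ + j) w ≤
      max (bestK prev wt s h σ w) (bestK prev wt s h σ (w - (m : Int) * wt) + (m : Int) * h) := by
  induction j with
  | zero => exact le_max_left _ _
  | succ i ih =>
    have hi : i ≤ m := by omega
    show (if _ then _ else _) ≤ _
    split_ifs with hg
    · simp only [Nat.add_eq] at hg ⊢
      refine max_le (ih hi) ?_
      refine le_trans ?_ (le_max_right _ _)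
      have hk' : σ + i + 1 ≥ m := by omega
      set k' : Nat := σ + i + 1 - m with hk'def
      have hkk : (k' : Int) = ((σ + i : Nat) : Int) + 1 - (m : Int) := by push_cast; omega
      have harg : w - (((σ + i : Nat) : Int) + 1) * wt = w - (m : Int) * wt - (k' : Int) * wt := by
        rw [hkk]; ring
      have hh : (((σ + i : Nat) : Int) + 1) * h = (k' : Int) * h + (m : Int) * h := by
        rw [hkk]; ring
      rw [harg, hh, ← add_assoc]
      have hws' : w - (m : Int) * wt ≤ s := by nlinarith
      rcases Nat.eq_zero_or_pos k' with hk0 | hk1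
    -- k' = 0 : the candidate is pv at w - m*wt
      · rw [hk0]
        push_cast
        simp only [zero_mul, sub_zero, add_zero]
        exact add_le_add (pv_le_bestK prev wt s h σ _) le_rfl
      · have hkσ : k' ≤ σ := by omega
        have hkw' : (k' : Int) * wt ≤ w - (m : Int) * wt := by
          have hx : (k' : Int) * wt = (((σ + i : Nat) : Int) + 1) * wt - (m : Int) * wt := by
            rw [hkk]; ring
          rw [hx]; linarith [hg.1]
        exact add_le_add (cand_le_bestK prev wt s h hk1 hkσ hkw' hws') le_rfl
    · exact ih hi

-- one 0/1 piece pass advances the canonical row by m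
theorem pieceRow_rowOf (prev : List Int) {wt : Int} (s h : Int) {mw : Int} (_hmw : 0 ≤ mw)
    {m : Int} {σ : Nat} (hm : 1 ≤ m) (hmσ : m ≤ (σ : Int) + 1) (hwt : 0 ≤ wt) :
    pieceRowB mw s (rowOf prev wt s h mw σ) (m * wt) (m * h) =
      rowOf prev wt s h mw (σ + m.toNat) := by
  have hm1 : 1 ≤ m.toNat := by omega
  have hmm : (m.toNat : Int) = m := by omega
  unfold pieceRowB rowOf
  apply List.map_congr_left
  intro w hw
  rw [PySem.List.mem_pyRange_one] at hw
  have hw0 : 0 ≤ w := hw.1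
  have hpv : ∀ x : Int, 0 ≤ x → x < mw + 1 →
      PySem.List.pyGetD ((PySem.List.pyRange 0 (mw + 1) 1).map (bestK prev wt s h σ)) x 0 =
        bestK prev wt s h σ x := by
    intro x hx1 hx2
    exact PySem.List.pyGetD_map_pyRange_of_nonneg _ _ _ _ hx1 hx2
  split_ifs with hg
  · -- usable: m*wt ≤ w and w ≤ s
    have hmw0 : 0 ≤ m * wt := mul_nonneg (by omega) hwt
    rw [hpv w hw0 hw.2, hpv (w - m * wt) (by omega) (by omega)]
    have hle : max (bestK prev wt s h σ w) (bestK prev wt s h σ (w - m * wt) + m * h) ≤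
        bestK prev wt s h (σ + m.toNat) w := by
      refine max_le (bestK_mono prev wt s h (by omega) w) ?_
      have := shift_le_bestK prev s h (m := m.toNat) hm1 hwt (by rw [hmm]; exact hg.1) hg.2 σ
      rw [hmm] at this
      exact le_trans this (bestK_mono prev wt s h (by omega) w)
    have hge := bestK_upper prev s h (m := m.toNat) (σ := σ) hm1 (by omega) hwt
      (by rw [hmm]; exact hg.1) hg.2 m.toNat le_rfl
    rw [hmm] at hge
    exact le_antisymm hle hge
  · -- unusable at this w
    rw [hpv w hw0 hw.2]
    rcases not_and_or.mp hg with hgw | hgs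
    · -- m*wt > w (and in particular wt could still be ≥ 0): higher k never fits either
      by_cases hs : w ≤ s
      · have hlt : w < ((σ : Int) + 1) * wt := by
          have : m * wt ≤ ((σ : Int) + 1) * wt := mul_le_mul_of_nonneg_right hmσ hwt
          omega
        have := bestK_stable prev s h (n := σ) (w := w) hwt hlt m.toNat
        exact this.symm
      · rw [bestK_of_gt_s prev wt s h σ (by omega), bestK_of_gt_s prev wt s h (σ + m.toNat) (by omega)]
    · rw [bestK_of_gt_s prev wt s h σ (by omega), bestK_of_gt_s prev wt s h (σ + m.toNat) (by omega)]

-- the pieces fold realises all c copies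
theorem piecesFold (prev : List Int) {wt : Int} (s h : Int) {mw : Int} (hmw : 0 ≤ mw)
    (hwt : 0 ≤ wt) :
    ∀ (fuel : Nat) (c p : Int) (σ : Nat), 0 ≤ c → c.toNat ≤ fuel → 1 ≤ p → p ≤ (σ : Int) + 1 →
      (piecesB fuel c p).foldl
          (fun dp m => pieceRowB mw s dp (m * wt) (m * h)) (rowOf prev wt s h mw σ) =
        rowOf prev wt s h mw (σ + c.toNat) := by
  intro fuel
  induction fuel with
  | zero =>
    intro c p σ hc hfuel hp hpσ
    have : c = 0 := by omega
    subst this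
    simp [piecesB]
  | succ f ih =>
    intro c p σ hc hfuel hp hpσ
    by_cases hc0 : 0 < c
    · have hm1 : 1 ≤ min p c := by omega
      rw [show piecesB (f + 1) c p = min p c :: piecesB f (c - min p c) (p * 2) from by
        simp [piecesB, hc0]]
      rw [List.foldl_cons]
      rw [pieceRow_rowOf prev s h hmw hm1 (by omega) hwt]
      by_cases hrest : c - min p c = 0
      · have : piecesB f (c - min p c) (p * 2) = [] := by
          rw [hrest]; cases f <;> simp [piecesB]
        rw [this, List.foldl_nil]
        congr 1
        omega
      · have hpc : min p c = p := by omega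
        rw [hpc]
        have := ih (c - p) (p * 2) (σ + p.toNat) (by omega) (by omega) (by omega) (by push_cast; omega)
        rw [this]
        congr 1
        omega
    · have : c = 0 := by omega
      subst this
      simp [piecesB]

-- A's k-loop computes bestK
theorem foldA_bestK (prev : List Int) (wt s h : Int) (n : Nat) (w : Int) :
    (PySem.List.pyRange 1 ((n : Int) + 1) 1).foldl
        (fun cur k =>
          if k * wt ≤ w ∧ w ≤ s then
            max cur (PySem.List.pyGetD prev (w - k * wt) 0 + k * h)
          else cur)
        (PySem.List.pyGetD prev w 0) =
      bestK prev wt s h n w := by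
  induction n with
  | zero =>
    rw [show ((0 : Nat) : Int) + 1 = 1 from by norm_num,
      PySem.List.pyRange_one_eq_nil (le_refl (1 : Int))]
    rfl
  | succ j ih =>
    have hsplit : PySem.List.pyRange 1 (((j + 1 : Nat) : Int) + 1) 1 =
        PySem.List.pyRange 1 ((j : Int) + 1) 1 ++ [(j : Int) + 1] := by
      push_cast
      exact PySem.List.pyRange_one_succ_right (by omega)
    rw [hsplit, List.foldl_append, ih, List.foldl_cons, List.foldl_nil]
    rfl

theorem rowOf_zero (prev : List Int) (wt s h : Int) {mw : Int}
    (hlen : prev.length = (mw + 1).toNat) (hmw : 0 ≤ mw) :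
    rowOf prev wt s h mw 0 = prev := by
  have hcast : mw + 1 = (prev.length : Int) := by omega
  unfold rowOf
  show (PySem.List.pyRange 0 (mw + 1) 1).map (fun w => PySem.List.pyGetD prev w 0) = prev
  rw [hcast]
  exact PySem.List.map_pyGetD_pyRange_zero prev 0

theorem blockEq (mw : Int) (hmw : 0 ≤ mw) (prev : List Int)
    (hlen : prev.length = (mw + 1).toNat) (b : Int × Int × Int × Int)
    (hb : 1 ≤ b.1 → 0 ≤ b.2.2.1 → 0 ≤ b.2.1) :
    rowA mw prev b =
      (piecesB b.1.toNat b.1 1).foldl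
        (fun dp m => pieceRowB mw b.2.2.1 dp (m * b.2.1) (m * b.2.2.2)) prev := by
  obtain ⟨c, wt, s, h⟩ := b
  simp only at hb ⊢
  by_cases hc : 1 ≤ c
  · by_cases hs : 0 ≤ s
    · -- main case: the block is usable, its weight is nonnegative
      have hwt : 0 ≤ wt := hb hc hs
      have hcc : ((c.toNat : Nat) : Int) = c := by omega
      have hA : rowA mw prev (c, wt, s, h) = rowOf prev wt s h mw c.toNat := by
        unfold rowA rowOf
        apply List.map_congr_left
        intro w _
        have := foldA_bestK prev wt s h c.toNat w
        rw [hcc] at this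
        exact this
      have hB : (piecesB c.toNat c 1).foldl
          (fun dp m => pieceRowB mw s dp (m * wt) (m * h)) prev = rowOf prev wt s h mw c.toNat := by
        conv_lhs => rw [← rowOf_zero prev wt s h hlen hmw]
        rw [piecesFold prev s h hmw hwt c.toNat c 1 0 (by omega) le_rfl le_rfl (by norm_num),
          Nat.zero_add]
      rw [hA, hB]
    · -- support < 0: the block is never usable on any w ≥ 0; both sides leave the row alone
      rw [not_le] at hs
      have hcast : mw + 1 = ((prev.length : Nat) : Int) := by omega
      have hA : rowA mw prev (c, wt, s, h) = prev := by
        unfold rowA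
        have hmap : (PySem.List.pyRange 0 (mw + 1) 1).map (fun w =>
            (PySem.List.pyRange 1 (c + 1) 1).foldl
              (fun cur k => if k * wt ≤ w ∧ w ≤ s then
                max cur (PySem.List.pyGetD prev (w - k * wt) 0 + k * h) else cur)
              (PySem.List.pyGetD prev w 0)) =
            (PySem.List.pyRange 0 (mw + 1) 1).map (fun w => PySem.List.pyGetD prev w 0) := by
          apply List.map_congr_left
          intro w hw
          rw [PySem.List.mem_pyRange_one] at hw
          rw [PySem.List.foldl_congr_mem _ _ (fun cur _ => cur) _
            (by intro acc x hx; rw [if_neg]; rintro ⟨-, h2⟩; omega)]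
          exact List.foldl_fixed _
        rw [hmap, hcast]
        exact PySem.List.map_pyGetD_pyRange_zero prev 0
      have hstep : ∀ (m : Int), pieceRowB mw s prev (m * wt) (m * h) = prev := by
        intro m
        unfold pieceRowB
        have hmap : (PySem.List.pyRange 0 (mw + 1) 1).map (fun w =>
            if m * wt ≤ w ∧ w ≤ s then
              max (PySem.List.pyGetD prev w 0) (PySem.List.pyGetD prev (w - m * wt) 0 + m * h)
            else PySem.List.pyGetD prev w 0) =
            (PySem.List.pyRange 0 (mw + 1) 1).map (fun w => PySem.List.pyGetD prev w 0) := by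
          apply List.map_congr_left
          intro w hw
          rw [PySem.List.mem_pyRange_one] at hw
          rw [if_neg]
          rintro ⟨-, h2⟩; omega
        rw [hmap, hcast]
        exact PySem.List.map_pyGetD_pyRange_zero prev 0
      have hfold : ∀ l : List Int,
          l.foldl (fun dp m => pieceRowB mw s dp (m * wt) (m * h)) prev = prev := by
        intro l
        induction l with
        | nil => rfl
        | cons x xs ih => rw [List.foldl_cons, hstep]; exact ih
      rw [hA, hfold]
  · -- count ≤ 0: no copies may be used; both sides leave the row alone
    rw [not_le] at hc
    have hpieces : piecesB c.toNat c 1 = [] := by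
      have : c.toNat = 0 := by omega
      rw [this]; rfl
    rw [hpieces, List.foldl_nil]
    unfold rowA
    have hr : PySem.List.pyRange 1 (c + 1) 1 = [] := PySem.List.pyRange_one_eq_nil (by omega)
    rw [hr]
    simp only [List.foldl_nil]
    have hcast : mw + 1 = ((prev.length : Nat) : Int) := by omega
    rw [hcast]
    exact PySem.List.map_pyGetD_pyRange_zero prev 0

theorem rowA_length (mw : Int) (prev : List Int) (b : Int × Int × Int × Int) :
    (rowA mw prev b).length = (mw + 1).toNat := by
  simp [rowA, PySem.List.length_pyRange_one]

theorem foldEq (mw : Int) (hmw : 0 ≤ mw) :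
    ∀ (l : List (Int × Int × Int × Int)) (prev : List Int),
      prev.length = (mw + 1).toNat →
      (∀ b ∈ l, 1 ≤ b.1 → 0 ≤ b.2.2.1 → 0 ≤ b.2.1) →
      l.foldl (fun prev b => rowA mw prev b) prev =
        l.foldl (fun dp b =>
          (piecesB b.1.toNat b.1 1).foldl
            (fun dp m => pieceRowB mw b.2.2.1 dp (m * b.2.1) (m * b.2.2.2)) dp) prev := by
  intro l
  induction l with
  | nil => intro prev _ _; rfl
  | cons b rest ih =>
    intro prev hlen hcond
    rw [List.foldl_cons, List.foldl_cons]
    rw [← blockEq mw hmw prev hlen b (hcond b (List.mem_cons_self ..))]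
    exact ih (rowA mw prev b) (rowA_length mw prev b)
      (fun b' hb' => hcond b' (List.mem_cons_of_mem b hb'))

-- ===== VERDICT (by name: the statement is the Claim_ definition above) =====
theorem max_tower_height_w_spec : Claim_equal_max_tower_height_w := by
  intro blocks _ hpre
  obtain ⟨hne, ⟨b0, hb0mem, hb0s⟩, hall⟩ := hpre
  unfold Spec_max_tower_height_w max_tower_height_w max_tower_height_w_alt
  dsimp only
  have hperm := PySem.List.sorted2_perm blocks (fun x => x.2.2.1) (fun x => -x.2.2.2) false
  set bs := PySem.List.sorted2 blocks (fun x => x.2.2.1) (fun x => -x.2.2.2) with hbs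
  have hbsne : bs ≠ [] := by
    intro hnil
    exact hne ((hnil ▸ hperm).symm.eq_nil)
  obtain ⟨mval, hmax⟩ : ∃ m, PySem.List.max? (bs.map (fun b => b.2.2.1)) (fun x => x) = some m := by
    cases hm : PySem.List.max? (bs.map (fun b => b.2.2.1)) (fun x => x) with
    | none =>
      rw [PySem.List.max?_eq_none_iff, List.map_eq_nil_iff] at hm
      exact absurd hm hbsne
    | some m => exact ⟨m, rfl⟩
  rw [hmax]
  simp only [Option.getD_some]
  have hmw0 : 0 ≤ mval := by
    have hmem : b0 ∈ bs := hperm.mem_iff.mpr hb0mem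
    have : b0.2.2.1 ∈ bs.map (fun b => b.2.2.1) := List.mem_map_of_mem hmem
    exact le_trans hb0s (PySem.List.max?_isMax hmax _ this)
  exact (foldEq mval hmw0 bs (List.replicate (mval + 1).toNat 0)
    (by rw [List.length_replicate])
    (fun b hb => hall b (hperm.subset hb))) ▸ rfl
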